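-- pv_equiv track=rewrite | github.com/Taekyo-Lee/sw_expert_academy | problem_bank/25478/python/stress_test3.py | gen_clique_plus_isolated
-- ===== SOURCE A (Python) =====
-- def gen_clique_plus_isolated(clique_size, num_isolated, D):
--     """Clique of given size plus isolated vertices."""
--     N = clique_size + num_isolated
--     A = [[0]*N for _ in range(N)]
--     for i in range(N):
--         A[i][i] = 1
--     for i in range(clique_size):
--         for j in range(i+1, clique_size):
--             A[i][j] = 1
--             A[j][i] = 1
--     return A
-- ===== SOURCE B (Python) =====
-- def gen_clique_plus_isolated(clique_size, num_isolated, D):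
--     """Clique of given size plus isolated vertices."""
--     N = clique_size + num_isolated
--     clique_row = [1] * clique_size + [0] * num_isolated
--     return [list(clique_row) if i < clique_size
--             else [0] * i + [1] + [0] * (N - i - 1)
--             for i in range(N)]
-- ===== Notes on version B (the rewrite author's own statement) =====
-- stated objective: alternative
-- what changed: B assembles the matrix row-by-row from precomputed blocks -- one shared clique row ([1]*clique_size + [0]*num_isolated) copied for each clique vertex, and a unit row [0]*i + [1] + [0]*(N-i-1) for each isolated vertex -- instead of A's zero matrix patched by a diagonal pass and a symmetric double loop.
import Mathlib
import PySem

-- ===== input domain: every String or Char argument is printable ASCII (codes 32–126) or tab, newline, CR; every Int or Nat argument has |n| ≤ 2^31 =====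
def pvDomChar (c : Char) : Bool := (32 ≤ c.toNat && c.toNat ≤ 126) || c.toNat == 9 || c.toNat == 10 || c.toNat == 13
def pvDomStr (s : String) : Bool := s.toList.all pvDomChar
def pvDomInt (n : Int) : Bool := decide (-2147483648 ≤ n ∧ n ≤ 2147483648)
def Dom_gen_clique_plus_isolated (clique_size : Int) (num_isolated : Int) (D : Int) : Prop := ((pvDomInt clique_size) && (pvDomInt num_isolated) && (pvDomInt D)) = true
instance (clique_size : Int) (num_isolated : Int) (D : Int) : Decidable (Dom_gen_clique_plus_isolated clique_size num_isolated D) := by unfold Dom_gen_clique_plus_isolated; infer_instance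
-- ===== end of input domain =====

-- B builds the matrix row-by-row from precomputed blocks (one shared clique row, and unit rows for
-- isolated vertices) instead of A's zero fill patched by a diagonal pass and a symmetric double loop;
-- objective: alternative.

-- ===== PORT A =====
-- A[i][j] = v  (in-range assignment; out-of-range inputs are excluded by Pre_)
def pvSetMat (M : List (List Int)) (i j : Nat) (v : Int) : List (List Int) :=
  M.set i ((M.getD i []).set j v)

def gen_clique_plus_isolated (clique_size : Int) (num_isolated : Int) (D : Int) : List (List Int) :=
  let n := (clique_size + num_isolated).toNat
  let A0 := List.replicate n (List.replicate n (0 : Int))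
  let A1 := (List.range n).foldl (fun M i => pvSetMat M i i 1) A0
  let cs := clique_size.toNat
  (List.range cs).foldl
    (fun M i => (List.range' (i + 1) (cs - (i + 1))).foldl
      (fun M2 j => pvSetMat (pvSetMat M2 i j 1) j i 1) M) A1

-- ===== PORT B =====
def gen_clique_plus_isolated_alt (clique_size : Int) (num_isolated : Int) (D : Int) : List (List Int) :=
  let n := (clique_size + num_isolated).toNat
  let clique_row := List.replicate clique_size.toNat (1 : Int) ++ List.replicate num_isolated.toNat (0 : Int)
  (List.range n).map (fun (i : Nat) =>
    if (i : Int) < clique_size then clique_row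
    else List.replicate i (0 : Int) ++ [1] ++ List.replicate (n - i - 1) (0 : Int))

-- ===== PRECONDITION & SPEC =====
-- Pre_ excludes exactly the inputs where A raises IndexError (clique_size ≥ 2 ∧ num_isolated < 0:
-- the clique loop indexes past the N×N matrix); A returns on every other input.
def Pre_gen_clique_plus_isolated (clique_size : Int) (num_isolated : Int) (D : Int) : Prop :=
  clique_size ≤ 1 ∨ 0 ≤ num_isolated
instance (clique_size : Int) (num_isolated : Int) (D : Int) : Decidable (Pre_gen_clique_plus_isolated clique_size num_isolated D) := by unfold Pre_gen_clique_plus_isolated; infer_instance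

def pvWitness_gen_clique_plus_isolated : Int × Int × Int := (3, 2, 0)

def Spec_gen_clique_plus_isolated (clique_size : Int) (num_isolated : Int) (D : Int) (out : List (List Int)) : Prop := out = gen_clique_plus_isolated_alt clique_size num_isolated D
instance (clique_size : Int) (num_isolated : Int) (D : Int) (out : List (List Int)) : Decidable (Spec_gen_clique_plus_isolated clique_size num_isolated D out) := by unfold Spec_gen_clique_plus_isolated; infer_instance

-- ===== CLAIM (what is proved, stated in full; the proofs are below) =====
def Claim_equal_gen_clique_plus_isolated : Prop := ∀ (clique_size : Int) (num_isolated : Int) (D : Int), Dom_gen_clique_plus_isolated clique_size num_isolated D → Pre_gen_clique_plus_isolated clique_size num_isolated D → Spec_gen_clique_plus_isolated clique_size num_isolated D (gen_clique_plus_isolated clique_size num_isolated D)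
-- ===== LEMMAS AND PROOFS =====

def pvGet2 (M : List (List Int)) (a b : Nat) : Int := (M.getD a []).getD b 0

def pvShp (n : Nat) (M : List (List Int)) : Prop := M.length = n ∧ ∀ r ∈ M, r.length = n

theorem pvGetD_set {α : Type} (l : List α) (i a : Nat) (x d : α) :
    (l.set i x).getD a d = if a = i ∧ i < l.length then x else l.getD a d := by
  simp only [List.getD, List.getElem?_set]
  split_ifs <;> simp_all

theorem pvGetD_in {α : Type} (l : List α) (a : Nat) (d : α) (h : a < l.length) :
    l.getD a d = l[a] := by
  simp [List.getD, List.getElem?_eq_getElem h]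

theorem pvShp_set {n : Nat} {M : List (List Int)} (h : pvShp n M) (i j : Nat) (v : Int)
    (hi : i < n) : pvShp n (pvSetMat M i j v) := by
  obtain ⟨hl, hr⟩ := h
  refine ⟨by simp [pvSetMat, hl], ?_⟩
  intro r hrm
  rcases List.mem_or_eq_of_mem_set hrm with h1 | h1
  · exact hr r h1
  · subst h1
    have hi' : i < M.length := by omega
    rw [pvGetD_in M i [] hi']
    simpa using hr _ (List.getElem_mem hi')

theorem pvGet2_set {n : Nat} {M : List (List Int)} (h : pvShp n M) {i j : Nat}
    (hi : i < n) (hj : j < n) (v : Int) (a b : Nat) :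
    pvGet2 (pvSetMat M i j v) a b = if a = i ∧ b = j then v else pvGet2 M a b := by
  obtain ⟨hl, hr⟩ := h
  have hi' : i < M.length := by omega
  have hrowlen : (M.getD i []).length = n := by
    rw [pvGetD_in M i [] hi']; exact hr _ (List.getElem_mem hi')
  unfold pvGet2 pvSetMat
  rw [pvGetD_set]
  by_cases hai : a = i
  · subst hai
    rw [if_pos ⟨rfl, hi'⟩, pvGetD_set]
    split_ifs with h1 h2 h2 <;> first | rfl | (exfalso; omega)
  · rw [if_neg (by tauto)]
    rw [if_neg (by tauto)]

theorem pvGet2_zero (n a b : Nat) :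
    pvGet2 (List.replicate n (List.replicate n (0 : Int))) a b = 0 := by
  unfold pvGet2
  simp only [List.getD, List.getElem?_replicate]
  split_ifs <;> simp [List.getElem?_replicate] <;> split_ifs <;> simp

theorem pvShp_zero (n : Nat) : pvShp n (List.replicate n (List.replicate n (0 : Int))) := by
  refine ⟨by simp, ?_⟩
  intro r hr
  rw [List.eq_of_mem_replicate hr]; simp

theorem pvDiagFold {n : Nat} (M : List (List Int)) (h : pvShp n M) (k : Nat) (hk : k ≤ n) :
    pvShp n ((List.range k).foldl (fun M i => pvSetMat M i i 1) M) ∧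
    ∀ a b, pvGet2 ((List.range k).foldl (fun M i => pvSetMat M i i 1) M) a b
      = if a = b ∧ a < k then 1 else pvGet2 M a b := by
  induction k with
  | zero => exact ⟨by simpa using h, fun a b => by rw [if_neg (by omega)]; rfl⟩
  | succ k ih =>
    obtain ⟨s, g⟩ := ih (by omega)
    rw [List.range_succ, List.foldl_append, List.foldl_cons, List.foldl_nil]
    refine ⟨pvShp_set s k k 1 (by omega), fun a b => ?_⟩
    rw [pvGet2_set s (by omega) (by omega), g]
    split_ifs <;> first | rfl | (exfalso; omega)

theorem pvInnerFold {n : Nat} (i : Nat) (hin : i < n) :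
    ∀ (js : List Nat) (M : List (List Int)), pvShp n M → (∀ j ∈ js, j < n ∧ i < j) →
    pvShp n (js.foldl (fun M2 j => pvSetMat (pvSetMat M2 i j 1) j i 1) M) ∧
    ∀ a b, pvGet2 (js.foldl (fun M2 j => pvSetMat (pvSetMat M2 i j 1) j i 1) M) a b
      = if (a = i ∧ b ∈ js) ∨ (b = i ∧ a ∈ js) then 1 else pvGet2 M a b := by
  intro js
  induction js with
  | nil =>
    intro M hM _
    exact ⟨by simpa using hM, fun a b => by rw [if_neg (by simp)]; rfl⟩
  | cons j rest ih =>
    intro M hM hjs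
    obtain ⟨hjn, hij⟩ := hjs j (List.mem_cons_self)
    have hM1 : pvShp n (pvSetMat M i j 1) := pvShp_set hM i j 1 hin
    have hM2 : pvShp n (pvSetMat (pvSetMat M i j 1) j i 1) := pvShp_set hM1 j i 1 hjn
    simp only [List.foldl_cons]
    obtain ⟨s, g⟩ := ih _ hM2 (fun j' hj' => hjs j' (List.mem_cons_of_mem _ hj'))
    refine ⟨s, fun a b => ?_⟩
    rw [g, pvGet2_set hM1 hjn hin, pvGet2_set hM hin hjn]
    simp only [List.mem_cons]
    split_ifs <;> first | rfl | tauto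

theorem pvOuterFold {n cs : Nat} (hcs : cs ≤ n) (M : List (List Int)) (h : pvShp n M)
    (k : Nat) (hk : k ≤ cs) :
    pvShp n ((List.range k).foldl
      (fun M i => (List.range' (i + 1) (cs - (i + 1))).foldl
        (fun M2 j => pvSetMat (pvSetMat M2 i j 1) j i 1) M) M) ∧
    ∀ a b, pvGet2 ((List.range k).foldl
      (fun M i => (List.range' (i + 1) (cs - (i + 1))).foldl
        (fun M2 j => pvSetMat (pvSetMat M2 i j 1) j i 1) M) M) a b
      = if a ≠ b ∧ a < cs ∧ b < cs ∧ (a < k ∨ b < k) then 1 else pvGet2 M a b := by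
  induction k with
  | zero => exact ⟨by simpa using h, fun a b => by rw [if_neg (by omega)]; rfl⟩
  | succ k ih =>
    obtain ⟨s, g⟩ := ih (by omega)
    rw [List.range_succ, List.foldl_append, List.foldl_cons, List.foldl_nil]
    have hmem : ∀ j ∈ List.range' (k + 1) (cs - (k + 1)), j < n ∧ k < j := by
      intro j hj
      rw [List.mem_range'_1] at hj
      omega
    obtain ⟨s2, g2⟩ := pvInnerFold k (by omega) (List.range' (k + 1) (cs - (k + 1))) _ s hmem
    refine ⟨s2, fun a b => ?_⟩
    rw [g2, g]
    have hmemiff : ∀ x, x ∈ List.range' (k + 1) (cs - (k + 1)) ↔ (k + 1 ≤ x ∧ x < cs) := by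
      intro x; rw [List.mem_range'_1]; omega
    simp only [hmemiff]
    split_ifs <;> first | rfl | (exfalso; omega)

-- characterization of A's matrix on Pre_
theorem pvA_char (clique_size num_isolated D : Int)
    (hPre : clique_size ≤ 1 ∨ 0 ≤ num_isolated) :
    pvShp (clique_size + num_isolated).toNat (gen_clique_plus_isolated clique_size num_isolated D) ∧
    ∀ a b, a < (clique_size + num_isolated).toNat → b < (clique_size + num_isolated).toNat →
      pvGet2 (gen_clique_plus_isolated clique_size num_isolated D) a b
        = if a = b ∨ (a < clique_size.toNat ∧ b < clique_size.toNat) then 1 else 0 := by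
  set n := (clique_size + num_isolated).toNat with hn
  set cs := clique_size.toNat with hcsdef
  obtain ⟨s1, g1⟩ := pvDiagFold (List.replicate n (List.replicate n (0 : Int))) (pvShp_zero n) n le_rfl
  unfold gen_clique_plus_isolated
  simp only [← hn, ← hcsdef]
  by_cases hcs : cs ≤ n
  · obtain ⟨s2, g2⟩ := pvOuterFold hcs _ s1 cs le_rfl
    refine ⟨s2, fun a b ha hb => ?_⟩
    rw [g2, g1]
    simp only [pvGet2_zero]
    split_ifs <;> first | rfl | (exfalso; omega)
  · -- then clique_size ≤ 1, so the clique double loop performs no assignment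
    have hcs1 : cs ≤ 1 := by omega
    have hA2 : (List.range cs).foldl
        (fun M i => (List.range' (i + 1) (cs - (i + 1))).foldl
          (fun M2 j => pvSetMat (pvSetMat M2 i j 1) j i 1) M)
        ((List.range n).foldl (fun M i => pvSetMat M i i 1)
          (List.replicate n (List.replicate n (0 : Int))))
        = (List.range n).foldl (fun M i => pvSetMat M i i 1)
          (List.replicate n (List.replicate n (0 : Int))) := by
      rcases (by omega : cs = 0 ∨ cs = 1) with h | h <;> rw [h] <;> rfl
    rw [hA2]
    refine ⟨s1, fun a b ha hb => ?_⟩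
    rw [g1]
    simp only [pvGet2_zero]
    split_ifs <;> first | rfl | (exfalso; omega)

-- getD of a two-block row
theorem pvGetD_two_block (a b j : Nat) (x y : Int) (hj : j < a + b) :
    (List.replicate a x ++ List.replicate b y).getD j 0 = if j < a then x else y := by
  by_cases h : j < a
  · rw [List.getD_append _ _ _ j (by simpa using h), List.getD_replicate _ h, if_pos h]
  · rw [List.getD_append_right _ _ _ j (by simp; omega), if_neg h]
    exact List.getD_replicate _ (by simp; omega)

-- getD of a unit row
theorem pvGetD_unit_row (i m j : Nat) (hj : j < i + 1 + m) :
    (List.replicate i (0 : Int) ++ [1] ++ List.replicate m (0 : Int)).getD j 0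
      = if j = i then 1 else 0 := by
  by_cases h1 : j < i
  · rw [List.getD_append _ _ _ j (by simp; omega)]
    rw [List.getD_append _ _ _ j (by simp; omega)]
    rw [List.getD_replicate _ h1, if_neg (by omega)]
  · by_cases h2 : j = i
    · subst h2
      rw [List.getD_append _ _ _ j (by simp)]
      rw [List.getD_append_right _ _ _ j (by simp)]
      simp
    · rw [List.getD_append_right _ _ _ j (by simp; omega)]
      rw [if_neg h2]
      exact List.getD_replicate _ (by simp; omega)

-- characterization of B's matrix on Pre_
theorem pvB_char (clique_size num_isolated D : Int)
    (hPre : clique_size ≤ 1 ∨ 0 ≤ num_isolated) :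
    pvShp (clique_size + num_isolated).toNat
      (gen_clique_plus_isolated_alt clique_size num_isolated D) ∧
    ∀ a b, a < (clique_size + num_isolated).toNat → b < (clique_size + num_isolated).toNat →
      pvGet2 (gen_clique_plus_isolated_alt clique_size num_isolated D) a b
        = if a = b ∨ (a < clique_size.toNat ∧ b < clique_size.toNat) then 1 else 0 := by
  have hrow : ∀ i : Nat, i < (clique_size + num_isolated).toNat →
      (if (i : Int) < clique_size then
          List.replicate clique_size.toNat (1 : Int) ++ List.replicate num_isolated.toNat (0 : Int)
        else List.replicate i (0 : Int) ++ [1] ++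
          List.replicate ((clique_size + num_isolated).toNat - i - 1) (0 : Int)).length
        = (clique_size + num_isolated).toNat := by
    intro i hi
    by_cases hic : (i : Int) < clique_size
    · rw [if_pos hic]
      have hiso : 0 ≤ num_isolated := by rcases hPre with h | h <;> omega
      simp
      omega
    · rw [if_neg hic]
      simp
      omega
  constructor
  · refine ⟨by simp [gen_clique_plus_isolated_alt], ?_⟩
    intro r hr
    simp only [gen_clique_plus_isolated_alt, List.mem_map, List.mem_range] at hr
    obtain ⟨i, hi, hri⟩ := hr
    rw [← hri]
    exact hrow i hi
  · intro a b ha hb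
    unfold pvGet2 gen_clique_plus_isolated_alt
    rw [pvGetD_in _ a [] (by simpa using ha)]
    rw [List.getElem_map]
    simp only [List.getElem_range]
    by_cases hac : (a : Int) < clique_size
    · have hiso : 0 ≤ num_isolated := by rcases hPre with h | h <;> omega
      rw [if_pos hac]
      rw [pvGetD_two_block _ _ b 1 0 (by omega)]
      split_ifs <;> first | rfl | (exfalso; omega)
    · rw [if_neg hac]
      rw [pvGetD_unit_row a ((clique_size + num_isolated).toNat - a - 1) b (by omega)]
      split_ifs <;> first | rfl | (exfalso; omega)

-- ===== VERDICT (by name: the statement is the Claim_ definition above) =====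
theorem gen_clique_plus_isolated_spec : Claim_equal_gen_clique_plus_isolated := by
  intro clique_size num_isolated D _ hPre
  unfold Spec_gen_clique_plus_isolated
  obtain ⟨⟨hAl, hAr⟩, hAget⟩ := pvA_char clique_size num_isolated D hPre
  obtain ⟨⟨hBl, hBr⟩, hBget⟩ := pvB_char clique_size num_isolated D hPre
  set n := (clique_size + num_isolated).toNat with hn
  set A := gen_clique_plus_isolated clique_size num_isolated D with hA
  set B := gen_clique_plus_isolated_alt clique_size num_isolated D with hB
  apply List.ext_getElem
  · omega
  · intro i h1 h2
    have hi : i < n := by omega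
    have hAlen : A[i].length = n := hAr _ (List.getElem_mem h1)
    have hBlen : B[i].length = n := hBr _ (List.getElem_mem h2)
    apply List.ext_getElem
    · omega
    · intro j h3 h4
      have hj : j < n := by omega
      have hgA : pvGet2 A i j = A[i][j] := by
        unfold pvGet2
        rw [pvGetD_in A i [] h1, pvGetD_in A[i] j 0 (by omega)]
      have hgB : pvGet2 B i j = B[i][j] := by
        unfold pvGet2
        rw [pvGetD_in B i [] h2, pvGetD_in B[i] j 0 (by omega)]
      rw [← hgA, ← hgB, hAget i j hi hj, hBget i j hi hj]
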